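-- pv_equiv track=rewrite | github.com/anarsiel/University | ml/hw-09/Димитров Благой Руменович Clust.py | get_labels_by_closest
-- ===== SOURCE A (Python) =====
-- def get_labels_by_closest(data_X, closest_to_centroid_idxs):
--     labels = []
--     for i in range(len(data_X)):
--         for j in range(len(closest_to_centroid_idxs)):
--             if i in closest_to_centroid_idxs[j]:
--                 labels.append(j + 1)
--                 break
--     return labels
-- ===== SOURCE B (Python) =====
-- def get_labels_by_closest(data_X, closest_to_centroid_idxs):
--     first = {}
--     for j, cluster in enumerate(closest_to_centroid_idxs):
--         for idx in cluster:
--             if idx not in first: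
--                 first[idx] = j + 1
--     return [first[i] for i in range(len(data_X)) if i in first]
-- ===== Notes on version B (the rewrite author's own statement) =====
-- stated objective: faster
-- what changed: Instead of scanning every cluster list for every point index (membership test per point per cluster), B builds a dict mapping index -> first cluster label in one pass over the clusters and then emits labels in a single pass over range(len(data_X)).
import Mathlib
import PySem

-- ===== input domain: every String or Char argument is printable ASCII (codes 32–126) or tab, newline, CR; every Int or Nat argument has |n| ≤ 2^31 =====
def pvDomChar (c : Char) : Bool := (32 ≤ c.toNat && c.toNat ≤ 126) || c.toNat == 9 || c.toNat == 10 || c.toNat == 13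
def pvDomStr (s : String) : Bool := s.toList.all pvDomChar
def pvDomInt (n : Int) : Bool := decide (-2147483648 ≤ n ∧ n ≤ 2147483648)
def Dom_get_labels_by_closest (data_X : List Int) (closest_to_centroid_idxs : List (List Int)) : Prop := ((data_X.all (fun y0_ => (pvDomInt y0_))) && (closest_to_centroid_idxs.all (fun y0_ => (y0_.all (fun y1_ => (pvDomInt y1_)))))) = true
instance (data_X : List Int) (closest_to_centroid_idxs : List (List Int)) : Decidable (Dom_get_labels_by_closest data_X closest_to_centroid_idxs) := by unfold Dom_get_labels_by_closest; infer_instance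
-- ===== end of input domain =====

-- B replaces A's per-point scan of all cluster lists by a dict idx -> first label built once, then one pass (faster).


-- ===== PORT A =====
-- inner loop 'for j in range(len(cs)): if i in cs[j]: labels.append(j+1); break'
def aInner (i : Int) : List (List Int) → Int → List Int → List Int
  | [], _, labels => labels
  | c :: rest, j, labels =>
      if i ∈ c then labels ++ [j + 1] else aInner i rest (j + 1) labels

def get_labels_by_closest (data_X : List Int) (closest_to_centroid_idxs : List (List Int)) : List Int :=
  (PySem.List.pyRange 0 data_X.length 1).foldl
    (fun labels i => aInner i closest_to_centroid_idxs 0 labels) []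

-- ===== PORT B =====
-- 'for j, cluster in enumerate(cs): for idx in cluster: if idx not in first: first[idx] = j + 1'
def buildFirst (closest_to_centroid_idxs : List (List Int)) : PySem.Dict Int Int :=
  (PySem.List.enumerate closest_to_centroid_idxs).foldl
    (fun d p => p.2.foldl (fun d idx => if d.contains idx then d else d.insert idx (p.1 + 1)) d)
    PySem.Dict.empty

def get_labels_by_closest_alt (data_X : List Int) (closest_to_centroid_idxs : List (List Int)) : List Int :=
  let first := buildFirst closest_to_centroid_idxs
  (PySem.List.pyRange 0 data_X.length 1).filterMap (fun i => first.get? i)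

-- ===== PRECONDITION & SPEC =====
def Spec_get_labels_by_closest (data_X : List Int) (closest_to_centroid_idxs : List (List Int)) (out : List Int) : Prop := out = get_labels_by_closest_alt data_X closest_to_centroid_idxs
instance (data_X : List Int) (closest_to_centroid_idxs : List (List Int)) (out : List Int) : Decidable (Spec_get_labels_by_closest data_X closest_to_centroid_idxs out) := by unfold Spec_get_labels_by_closest; infer_instance

-- ===== CLAIM (what is proved, stated in full; the proofs are below) =====
def Claim_equal_get_labels_by_closest : Prop := ∀ (data_X : List Int) (closest_to_centroid_idxs : List (List Int)), Dom_get_labels_by_closest data_X closest_to_centroid_idxs → Spec_get_labels_by_closest data_X closest_to_centroid_idxs (get_labels_by_closest data_X closest_to_centroid_idxs)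

-- ===== LEMMAS AND PROOFS =====

-- first label of a cluster (starting at offset j) containing i
def firstLabel (i : Int) : List (List Int) → Int → Option Int
  | [], _ => none
  | c :: rest, j => if i ∈ c then some (j + 1) else firstLabel i rest (j + 1)

theorem aInner_eq (i : Int) (cs : List (List Int)) (j : Int) (labels : List Int) :
    aInner i cs j labels = labels ++ (firstLabel i cs j).toList := by
  induction cs generalizing j labels with
  | nil => simp [aInner, firstLabel]
  | cons c rest ih =>
      simp only [aInner, firstLabel]
      split_ifs <;> simp [ih]

theorem innerFold_get? (c : List Int) (v i : Int) (d : PySem.Dict Int Int) :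
    (c.foldl (fun d idx => if d.contains idx then d else d.insert idx v) d).get? i =
      ((d.get? i).orElse (fun _ => if i ∈ c then some v else none)) := by
  induction c generalizing d with
  | nil => cases h : d.get? i <;> simp [Option.orElse, h]
  | cons x rest ih =>
      simp only [List.foldl_cons]
      by_cases hc : d.contains x = true
      · rw [if_pos hc, ih]
        by_cases hix : i = x
        · subst hix
          have : (d.get? i).isSome := by
            rw [← PySem.Dict.contains_eq_isSome_get?]; exact hc
          cases h : d.get? i with
          | none => simp [h] at this
          | some w => simp [Option.orElse, h]
        · cases h : d.get? i <;> simp [Option.orElse, h, hix]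
      · rw [if_neg hc, ih]
        have hd : d.get? x = none := by
          cases h : d.get? x with
          | none => rfl
          | some w =>
              exfalso; apply hc
              rw [PySem.Dict.contains_eq_isSome_get?, h]; rfl
        by_cases hix : i = x
        · subst hix
          simp [PySem.Dict.get?_insert_self, hd, Option.orElse]
        · rw [PySem.Dict.get?_insert_of_ne _ _ hix]
          cases h : d.get? i <;> simp [Option.orElse, h, hix]

theorem outerFold_get? (cs : List (List Int)) (j i : Int) (d : PySem.Dict Int Int) :
    ((PySem.List.enumerate cs j).foldl
        (fun d p => p.2.foldl (fun d idx => if d.contains idx then d else d.insert idx (p.1 + 1)) d) d).get? i =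
      ((d.get? i).orElse (fun _ => firstLabel i cs j)) := by
  induction cs generalizing j d with
  | nil =>
      simp only [PySem.List.enumerate_nil, List.foldl_nil, firstLabel]
      cases h : d.get? i <;> simp [Option.orElse, h]
  | cons c rest ih =>
      rw [PySem.List.enumerate_cons]
      simp only [List.foldl_cons, firstLabel]
      rw [ih, innerFold_get?]
      cases h : d.get? i with
      | some w => simp [Option.orElse, h]
      | none =>
          simp only [Option.orElse, h]
          split_ifs <;> simp [Option.orElse]

theorem buildFirst_get? (cs : List (List Int)) (i : Int) :
    (buildFirst cs).get? i = firstLabel i cs 0 := by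
  unfold buildFirst
  rw [outerFold_get? cs 0 i PySem.Dict.empty]
  simp [Option.orElse, PySem.Dict.get?_empty]

theorem foldl_append_toList {α β : Type} (l : List α) (f : α → Option β) (acc : List β) :
    l.foldl (fun acc i => acc ++ (f i).toList) acc = acc ++ l.filterMap f := by
  induction l generalizing acc with
  | nil => simp
  | cons x rest ih =>
      simp only [List.foldl_cons, List.filterMap_cons]
      cases h : f x <;> simp [h, ih]

-- ===== VERDICT (by name: the statement is the Claim_ definition above) =====
theorem get_labels_by_closest_spec : Claim_equal_get_labels_by_closest := by
  intro data_X cs _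
  unfold Spec_get_labels_by_closest get_labels_by_closest get_labels_by_closest_alt
  have h1 : ∀ labels i, aInner i cs 0 labels = labels ++ (firstLabel i cs 0).toList :=
    fun labels i => aInner_eq i cs 0 labels
  calc (PySem.List.pyRange 0 data_X.length 1).foldl
          (fun labels i => aInner i cs 0 labels) []
      = (PySem.List.pyRange 0 data_X.length 1).foldl
          (fun labels i => labels ++ (firstLabel i cs 0).toList) [] := by
        exact PySem.List.foldl_congr_mem _ _ _ _ (fun labels i _ => h1 labels i)
    _ = (PySem.List.pyRange 0 data_X.length 1).filterMap (fun i => firstLabel i cs 0) := by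
        rw [foldl_append_toList]; rfl
    _ = (PySem.List.pyRange 0 data_X.length 1).filterMap (fun i => (buildFirst cs).get? i) := by
        simp [buildFirst_get?]
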